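-- pv_equiv track=rewrite | github.com/6pri2/Verif_mdp | projet_mdp.py | PresenceMaj
-- ===== SOURCE A (Python) =====
-- def PresenceMaj(text): #def recherchant la présence d'une majuscule dans un texte
--     nb = 0 #on crée un compteur, comptant le nombre de majuscule dans le texte
--     Maj_autorisee = ['A','B','C','D','E','F','G','H','I','J','K','L','M', #liste des majuscule autorisée
--                      'N','O','P','Q','R','S','T','U','V','W','X','Y','Z']
--     for i in text: # on prend chaque caractère un par un dans la liste de caractère
--         if (i.upper() == i) and (i.upper() in Maj_autorisee): # si le caractère selectionné est égal au caractère en majuscule et qu'il est dans la liste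
--             nb = nb +1 #alors on ajoute 1 au compteur
--     if nb > 0: #si le compteur est strictement supérieur 0, alors il y a donc la présence d'une majuscule
--         return True #on retourne vrai
--     else: # sinon cela veut dire qu'il n'y a pas de majuscule
--         return False # donc on retourne faux
-- ===== SOURCE B (Python) =====
-- import re
--
-- _UPPER_RE = re.compile('[A-Z]')
--
-- def PresenceMaj(text):
--     return _UPPER_RE.search(text) is not None
-- ===== Notes on version B (the rewrite author's own statement) =====
-- stated objective: idiomatic
-- what changed: The explicit per-character loop with an uppercase counter compared to zero is replaced by a single regex search for the class [A-Z], returning the boolean of the match.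
import Mathlib
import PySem

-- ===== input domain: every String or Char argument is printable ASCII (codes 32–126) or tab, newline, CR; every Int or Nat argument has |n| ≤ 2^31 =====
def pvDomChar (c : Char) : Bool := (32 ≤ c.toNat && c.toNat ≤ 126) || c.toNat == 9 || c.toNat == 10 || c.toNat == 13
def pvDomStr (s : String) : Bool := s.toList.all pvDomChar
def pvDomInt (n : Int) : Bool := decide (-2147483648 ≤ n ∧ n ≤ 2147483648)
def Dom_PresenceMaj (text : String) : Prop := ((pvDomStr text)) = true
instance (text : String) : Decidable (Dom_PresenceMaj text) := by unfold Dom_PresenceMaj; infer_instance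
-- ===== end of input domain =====

-- B replaces A's explicit counting loop over a 26-element allowed-uppercase list by a single
-- regex search for the class [A-Z] (a range test per character), returning the match boolean.

-- ===== PORT A =====
-- the module-level list Maj_autorisee of A
def pvMajAutorisee : List Char :=
  ['A','B','C','D','E','F','G','H','I','J','K','L','M',
   'N','O','P','Q','R','S','T','U','V','W','X','Y','Z']

def PresenceMaj (text : String) : Bool :=
  let nb : Int :=
    text.toList.foldl
      (fun nb i =>
        if (PySem.Chars.upperChar i == i) && pvMajAutorisee.contains (PySem.Chars.upperChar i) then
          nb + 1
        else nb) 0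
  if nb > 0 then true else false

-- ===== PORT B =====
-- re.search('[A-Z]', text) is not None : the regex engine scans for the first character in the
-- range 'A'..'Z'; ported as an `any` with that range test (exact for the ASCII class [A-Z]).
def PresenceMaj_alt (text : String) : Bool :=
  text.toList.any (fun c => decide ('A' ≤ c) && decide (c ≤ 'Z'))

-- ===== PRECONDITION & SPEC =====
def Spec_PresenceMaj (text : String) (out : Bool) : Prop := out = PresenceMaj_alt text
instance (text : String) (out : Bool) : Decidable (Spec_PresenceMaj text out) := by unfold Spec_PresenceMaj; infer_instance

-- ===== CLAIM (what is proved, stated in full; the proofs are below) =====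
def Claim_equal_PresenceMaj : Prop := ∀ (text : String), Dom_PresenceMaj text → Spec_PresenceMaj text (PresenceMaj text)

-- ===== LEMMAS AND PROOFS =====

theorem pvCharLe_iff (a b : Char) : a ≤ b ↔ a.toNat ≤ b.toNat := by
  rw [Char.le_def, UInt32.le_iff_toNat_le]
  rfl

theorem pvMem_maj (c : Char) :
    pvMajAutorisee.contains c = true ↔ (65 ≤ c.toNat ∧ c.toNat ≤ 90) := by
  constructor
  · intro h
    simp only [pvMajAutorisee, List.contains_eq_mem, decide_eq_true_eq, List.mem_cons,
      List.not_mem_nil, or_false] at h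
    rcases h with rfl|rfl|rfl|rfl|rfl|rfl|rfl|rfl|rfl|rfl|rfl|rfl|rfl|rfl|rfl|rfl|rfl|rfl|rfl|rfl|rfl|rfl|rfl|rfl|rfl|rfl <;> exact (by decide)
  · rintro ⟨h1, h2⟩
    rw [← Char.ofNat_toNat c]
    generalize hg : c.toNat = n
    rw [hg] at h1 h2
    interval_cases n <;> decide

theorem pvCond_eq (c : Char) :
    ((PySem.Chars.upperChar c == c) && pvMajAutorisee.contains (PySem.Chars.upperChar c))
      = (decide ('A' ≤ c) && decide (c ≤ 'Z')) := by
  by_cases h : PySem.Chars.islower c = true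
  · have hb : 97 ≤ c.toNat ∧ c.toNat ≤ 122 := by
      simp only [PySem.Chars.islower, Bool.and_eq_true, decide_eq_true_eq, pvCharLe_iff] at h
      exact h
    have hup : PySem.Chars.upperChar c = Char.ofNat (c.toNat - 32) := by
      simp [PySem.Chars.upperChar, h]
    have ht : (Char.ofNat (c.toNat - 32)).toNat = c.toNat - 32 := by
      rw [Char.toNat_ofNat, if_pos]
      exact Or.inl (by omega)
    have hne : (PySem.Chars.upperChar c == c) = false := by
      rw [hup]
      apply beq_eq_false_iff_ne.mpr
      intro e
      have he := congrArg Char.toNat e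
      rw [ht] at he
      omega
    have hz : decide (c ≤ 'Z') = false := by
      simp only [decide_eq_false_iff_not, pvCharLe_iff]
      have h90 : ('Z' : Char).toNat = 90 := by decide
      rw [h90]
      omega
    rw [hne, hz]
    simp
  · have hup : PySem.Chars.upperChar c = c := by
      simp [PySem.Chars.upperChar, h]
    rw [hup, BEq.rfl, Bool.true_and, Bool.eq_iff_iff]
    simp only [Bool.and_eq_true, decide_eq_true_eq, pvCharLe_iff]
    rw [pvMem_maj]
    have h65 : ('A' : Char).toNat = 65 := by decide
    have h90 : ('Z' : Char).toNat = 90 := by decide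
    rw [h65, h90]

theorem pvFoldl_count (p : Char → Bool) (l : List Char) (n : Int) (hn : 0 ≤ n) :
    decide (l.foldl (fun nb i => if p i then nb + 1 else nb) n > 0)
      = (decide (n > 0) || l.any p) := by
  induction l generalizing n with
  | nil => simp
  | cons c t ih =>
    by_cases hp : p c = true
    · simp only [List.foldl_cons, List.any_cons, hp, if_true]
      rw [ih (n + 1) (by omega)]
      have hpos : decide (n + 1 > 0) = true := by simp; omega
      rw [hpos]
      simp
    · simp only [List.foldl_cons, List.any_cons, hp, Bool.false_or]
      exact ih n hn

-- ===== VERDICT (by name: the statement is the Claim_ definition above) =====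
theorem PresenceMaj_spec : Claim_equal_PresenceMaj := by
  intro text _
  show PresenceMaj text = PresenceMaj_alt text
  unfold PresenceMaj PresenceMaj_alt
  simp only [pvCond_eq]
  have h := pvFoldl_count (fun c => decide ('A' ≤ c) && decide (c ≤ 'Z')) text.toList 0 le_rfl
  simp only [gt_iff_lt, lt_self_iff_false, decide_false, Bool.false_or] at h
  rw [← h]
  simp
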